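-- pv_equiv track=rewrite | github.com/nikhilpolpakkara/Python | Exercise files/Basic Data processsing and Visualisation/Final Project/New NBA stat.py | ranking_dict
-- ===== SOURCE A (Python) =====
-- def ranking_dict(v1,v2,v3):
--     new_dict = {}
--     for i,j in v1.items():
--         for x,y in v2.items():
--             for a,b in v3.items():
--                 if i==x==a:
--                     new_dict[i]=j+y+b
--     new_rank = [(new_dict[p],p) for p in new_dict]
--     new_rank.sort()
--     return new_rank
-- ===== SOURCE B (Python) =====
-- def ranking_dict(v1, v2, v3):
--     common = v1.keys() & v2.keys() & v3.keys()
--     return sorted((v1[k] + v2[k] + v3[k], k) for k in common)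
-- ===== Notes on version B (the rewrite author's own statement) =====
-- stated objective: simpler
-- what changed: Replaces the three nested loops over all (i,x,a) key triples by a set intersection of the three key views followed by a single pass building (sum, key) pairs fed to sorted().
import Mathlib
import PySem

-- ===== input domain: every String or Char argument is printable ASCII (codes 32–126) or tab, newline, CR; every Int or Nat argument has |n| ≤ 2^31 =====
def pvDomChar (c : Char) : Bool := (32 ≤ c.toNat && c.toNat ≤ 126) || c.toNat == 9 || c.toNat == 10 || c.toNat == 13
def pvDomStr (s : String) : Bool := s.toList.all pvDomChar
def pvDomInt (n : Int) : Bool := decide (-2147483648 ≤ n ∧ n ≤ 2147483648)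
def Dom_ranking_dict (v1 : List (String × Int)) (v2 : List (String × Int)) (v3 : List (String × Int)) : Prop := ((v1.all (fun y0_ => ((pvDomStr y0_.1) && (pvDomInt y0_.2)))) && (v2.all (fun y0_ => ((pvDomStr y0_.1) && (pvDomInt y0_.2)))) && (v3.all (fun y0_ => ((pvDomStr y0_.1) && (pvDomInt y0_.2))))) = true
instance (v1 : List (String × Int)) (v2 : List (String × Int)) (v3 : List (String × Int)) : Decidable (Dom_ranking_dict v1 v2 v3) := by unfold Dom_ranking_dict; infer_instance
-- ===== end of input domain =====

-- B replaces A's three nested loops by a set intersection of the key views plus one pass over it, for simplicity and speed.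


-- ===== PORT A =====
-- literal transliteration: triple nested for over .items(), dict insert, comprehension over keys, .sort()
-- (new_dict[p] is total here because p ranges over new_dict's own keys, so getD's default is never used)
def ranking_dict (v1 : List (String × Int)) (v2 : List (String × Int)) (v3 : List (String × Int)) : List (Int × String) :=
  let new_dict : PySem.Dict String Int :=
    v1.foldl (fun nd ij =>
      v2.foldl (fun nd xy =>
        v3.foldl (fun nd ab =>
          if ij.1 == xy.1 && xy.1 == ab.1 then nd.insert ij.1 (ij.2 + xy.2 + ab.2) else nd)
          nd) nd) PySem.Dict.empty
  let new_rank := new_dict.keys.map (fun p => (new_dict.getD p 0, p))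
  PySem.List.sorted2 new_rank Prod.fst Prod.snd false

-- ===== PORT B =====
-- literal transliteration of Source B: key-view intersection, then sorted over one pass of lookups
-- (v1[k]/v2[k]/v3[k] are total here because k ∈ common, so getD's default is never used;
--  the set's iteration order is consumed only by sorted, whose result is order-independent here)
def ranking_dict_alt (v1 : List (String × Int)) (v2 : List (String × Int)) (v3 : List (String × Int)) : List (Int × String) :=
  let common := PySem.Set.inter (PySem.Set.inter (PySem.Set.ofList (v1.map Prod.fst)) (v2.map Prod.fst)) (v3.map Prod.fst)
  PySem.List.sorted2
    (common.map (fun k =>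
      ((PySem.Dict.mk v1).getD k 0 + (PySem.Dict.mk v2).getD k 0 + (PySem.Dict.mk v3).getD k 0, k)))
    Prod.fst Prod.snd false

-- ===== PRECONDITION & SPEC =====
-- The three lists encode Python dicts, whose keys are necessarily distinct; an association list
-- with a repeated key is the image of no dict argument, so Pre_ restricts to duplicate-free keys.
def Pre_ranking_dict (v1 : List (String × Int)) (v2 : List (String × Int)) (v3 : List (String × Int)) : Prop :=
  (v1.map Prod.fst).Nodup ∧ (v2.map Prod.fst).Nodup ∧ (v3.map Prod.fst).Nodup
instance (v1 : List (String × Int)) (v2 : List (String × Int)) (v3 : List (String × Int)) : Decidable (Pre_ranking_dict v1 v2 v3) := by unfold Pre_ranking_dict; infer_instance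
def pvWitness_ranking_dict : (List (String × Int)) × (List (String × Int)) × (List (String × Int)) :=
  ([("a", 3), ("b", 1)], [("a", 2)], [("a", 4), ("c", 7)])
def Spec_ranking_dict (v1 : List (String × Int)) (v2 : List (String × Int)) (v3 : List (String × Int)) (out : List (Int × String)) : Prop := out = ranking_dict_alt v1 v2 v3
instance (v1 : List (String × Int)) (v2 : List (String × Int)) (v3 : List (String × Int)) (out : List (Int × String)) : Decidable (Spec_ranking_dict v1 v2 v3 out) := by unfold Spec_ranking_dict; infer_instance

-- ===== CLAIM (what is proved, stated in full; the proofs are below) =====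
def Claim_equal_ranking_dict : Prop := ∀ (v1 : List (String × Int)) (v2 : List (String × Int)) (v3 : List (String × Int)), Dom_ranking_dict v1 v2 v3 → Pre_ranking_dict v1 v2 v3 → Spec_ranking_dict v1 v2 v3 (ranking_dict v1 v2 v3)

-- ===== LEMMAS AND PROOFS =====

-- the innermost loop does nothing when its condition fails on every element
theorem pv_inner_nop (i x : String) (j y : Int) (l : List (String × Int))
    (nd : PySem.Dict String Int)
    (h : ∀ ab ∈ l, (i == x && x == ab.1) = false) :
    l.foldl (fun nd ab => if i == x && x == ab.1 then nd.insert i (j + y + ab.2) else nd) nd = nd := by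
  induction l generalizing nd with
  | nil => rfl
  | cons a t ih =>
    rw [List.foldl_cons, h a (List.mem_cons_self)]
    simp only [Bool.false_eq_true, if_false]
    exact ih nd (fun ab hab => h ab (List.mem_cons_of_mem _ hab))

-- characterisation of the innermost loop (over v3)
theorem pv_inner (i x : String) (j y : Int) (v3 : List (String × Int))
    (nd : PySem.Dict String Int) (h3 : (v3.map Prod.fst).Nodup) :
    v3.foldl (fun nd ab => if i == x && x == ab.1 then nd.insert i (j + y + ab.2) else nd) nd
      = match (PySem.Dict.mk v3).get? x with
        | some b => if i = x then nd.insert i (j + y + b) else nd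
        | none => nd := by
  induction v3 generalizing nd with
  | nil => rfl
  | cons ab t ih =>
    obtain ⟨a, b⟩ := ab
    simp only [List.map_cons, List.nodup_cons] at h3
    obtain ⟨hnot, h3t⟩ := h3
    rw [List.foldl_cons, PySem.Dict.get?_mk_cons]
    by_cases hxa : x = a
    · have hax : (a == x) = true := by simp [hxa]
      rw [hax]
      simp only [if_true]
      by_cases hix : i = x
      · have hc : (i == x && x == (a, b).1) = true := by simp [hix, hxa]
        rw [hc]
        simp only [if_true]
        rw [pv_inner_nop i x j y t _ (fun ab hab => by
          have : x ≠ ab.1 := fun he => hnot (by rw [hxa] at he; exact he ▸ List.mem_map_of_mem hab)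
          simp [this])]
        simp [hix]
      · have hc : (i == x && x == (a, b).1) = false := by simp [hix]
        rw [hc]
        simp only [Bool.false_eq_true, if_false]
        rw [pv_inner_nop i x j y t _ (fun ab hab => by simp [hix])]
        simp [hix]
    · have hax : (a == x) = false := by simp [Ne.symm hxa]
      rw [hax]
      have hc : (i == x && x == (a, b).1) = false := by simp [hxa]
      rw [hc]
      simp only [Bool.false_eq_true, if_false]
      exact ih nd h3t

-- the middle loop does nothing when i matches no key of l
theorem pv_mid_nop (i : String) (j : Int) (l v3 : List (String × Int))
    (nd : PySem.Dict String Int)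
    (h : ∀ xy ∈ l, (i == xy.1) = false) :
    l.foldl (fun nd xy =>
        v3.foldl (fun nd ab => if i == xy.1 && xy.1 == ab.1 then nd.insert i (j + xy.2 + ab.2) else nd) nd) nd = nd := by
  induction l generalizing nd with
  | nil => rfl
  | cons xy t ih =>
    rw [List.foldl_cons,
      pv_inner_nop i xy.1 j xy.2 v3 nd (fun ab _ => by simp [h xy (List.mem_cons_self)])]
    exact ih nd (fun a ha => h a (List.mem_cons_of_mem _ ha))

-- characterisation of the middle loop (over v2 × v3)
theorem pv_mid (i : String) (j : Int) (v2 v3 : List (String × Int))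
    (nd : PySem.Dict String Int)
    (h2 : (v2.map Prod.fst).Nodup) (h3 : (v3.map Prod.fst).Nodup) :
    v2.foldl (fun nd xy =>
        v3.foldl (fun nd ab => if i == xy.1 && xy.1 == ab.1 then nd.insert i (j + xy.2 + ab.2) else nd) nd) nd
      = match (PySem.Dict.mk v2).get? i, (PySem.Dict.mk v3).get? i with
        | some y, some b => nd.insert i (j + y + b)
        | _, _ => nd := by
  induction v2 generalizing nd with
  | nil => rfl
  | cons xy t ih =>
    obtain ⟨x, y⟩ := xy
    simp only [List.map_cons, List.nodup_cons] at h2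
    obtain ⟨hnot, h2t⟩ := h2
    rw [List.foldl_cons, pv_inner i x j y v3 nd h3]
    by_cases hix : i = x
    · subst hix
      have hs : (PySem.Dict.mk ((i, y) :: t)).get? i = some y := by
        rw [PySem.Dict.get?_mk_cons]; simp
      rw [hs]
      cases hg3 : (PySem.Dict.mk v3).get? i with
      | none =>
        simp only [hg3]
        exact pv_mid_nop i j t v3 nd (fun xy hxy => by
          have h' : i ≠ xy.1 := fun he => hnot (he ▸ List.mem_map_of_mem hxy)
          simp [h'])
      | some b =>
        simp only [hg3]
        rw [if_pos trivial]
        exact pv_mid_nop i j t v3 _ (fun xy hxy => by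
          have h' : i ≠ xy.1 := fun he => hnot (he ▸ List.mem_map_of_mem hxy)
          simp [h'])
    · have hs : (PySem.Dict.mk ((x, y) :: t)).get? i = (PySem.Dict.mk t).get? i := by
        rw [PySem.Dict.get?_mk_cons]
        have hb : (x == i) = false := by simp [Ne.symm hix]
        rw [hb]
        simp
      rw [hs]
      cases hg3 : (PySem.Dict.mk v3).get? x with
      | none => simp only [hg3]; exact ih nd h2t
      | some b =>
        simp only [hg3]
        rw [if_neg hix]
        exact ih nd h2t

-- membership of a key as isSome of the dict lookup
theorem pv_isSome_eq (l : List (String × Int)) (k : String) :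
    ((PySem.Dict.mk l).get? k).isSome = (l.map Prod.fst).contains k := by
  induction l with
  | nil => simp [PySem.Dict.get?]
  | cons p t ih =>
    obtain ⟨a, b⟩ := p
    rw [PySem.Dict.get?_mk_cons]
    by_cases hak : a = k
    · simp [hak]
    · have hb1 : (a == k) = false := by simp [hak]
      have hb2 : (k == a) = false := by simp [Ne.symm hak]
      simp [hb1, hb2, ih]

-- the outer loop: items of the accumulated dict, for fresh distinct keys
theorem pv_outer (v2 v3 : List (String × Int))
    (h2 : (v2.map Prod.fst).Nodup) (h3 : (v3.map Prod.fst).Nodup) :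
    ∀ (v1 : List (String × Int)) (d : PySem.Dict String Int),
    (v1.map Prod.fst).Nodup → (∀ p ∈ v1, d.contains p.1 = false) →
    (v1.foldl (fun nd ij =>
        v2.foldl (fun nd xy =>
          v3.foldl (fun nd ab => if ij.1 == xy.1 && xy.1 == ab.1 then nd.insert ij.1 (ij.2 + xy.2 + ab.2) else nd)
            nd) nd) d).items
      = d.items ++ (v1.filter (fun p => (((PySem.Dict.mk v2).get? p.1).isSome && ((PySem.Dict.mk v3).get? p.1).isSome))).map
          (fun p => (p.1, p.2 + (PySem.Dict.mk v2).getD p.1 0 + (PySem.Dict.mk v3).getD p.1 0)) := by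
  intro v1
  induction v1 with
  | nil => intro d _ _; simp
  | cons ij t ih =>
    intro d h1 hfresh
    simp only [List.map_cons, List.nodup_cons] at h1
    obtain ⟨hnot, h1t⟩ := h1
    rw [List.foldl_cons, pv_mid ij.1 ij.2 v2 v3 d h2 h3]
    cases hg2 : (PySem.Dict.mk v2).get? ij.1 with
    | none =>
      simp only [hg2]
      rw [List.filter_cons]
      simp only [hg2, Option.isSome_none, Bool.false_and, Bool.false_eq_true, if_false]
      cases hg3 : (PySem.Dict.mk v3).get? ij.1 with
      | none => exact ih d h1t (fun p hp => hfresh p (List.mem_cons_of_mem _ hp))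
      | some b => exact ih d h1t (fun p hp => hfresh p (List.mem_cons_of_mem _ hp))
    | some yv =>
      cases hg3 : (PySem.Dict.mk v3).get? ij.1 with
      | none =>
        simp only [hg2, hg3]
        rw [List.filter_cons]
        simp only [hg3, Option.isSome_none, Bool.and_false, Bool.false_eq_true, if_false]
        exact ih d h1t (fun p hp => hfresh p (List.mem_cons_of_mem _ hp))
      | some bv =>
        simp only [hg2, hg3]
        have hfr : (d.insert ij.1 (ij.2 + yv + bv)).items = d.items ++ [(ij.1, ij.2 + yv + bv)] :=
          PySem.Dict.items_insert_of_not_contains _ _ (hfresh ij (List.mem_cons_self))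
        have hfresh' : ∀ p ∈ t, (d.insert ij.1 (ij.2 + yv + bv)).contains p.1 = false := by
          intro p hp
          rw [PySem.Dict.contains_insert]
          have hne : (p.1 == ij.1) = false := by
            have h' : ij.1 ≠ p.1 := fun he => hnot (he ▸ List.mem_map_of_mem hp)
            simp [Ne.symm h']
          rw [hne, hfresh p (List.mem_cons_of_mem _ hp)]
          rfl
        rw [ih _ h1t hfresh', hfr, List.filter_cons]
        simp only [hg2, hg3, Option.isSome_some, Bool.and_self, if_true, List.map_cons]
        rw [PySem.Dict.getD_of_get?_eq_some _ 0 hg2, PySem.Dict.getD_of_get?_eq_some _ 0 hg3,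
          List.append_assoc, List.singleton_append]

-- value lookup on a member of a duplicate-free association list
theorem pv_getD_mem (l : List (String × Int)) (p : String × Int)
    (hnd : (l.map Prod.fst).Nodup) (hp : p ∈ l) :
    (PySem.Dict.mk l).getD p.1 0 = p.2 := by
  induction l with
  | nil => cases hp
  | cons q t ih =>
    obtain ⟨a, b⟩ := q
    simp only [List.map_cons, List.nodup_cons] at hnd
    obtain ⟨hnot, hndt⟩ := hnd
    rw [PySem.Dict.getD_eq_get?_getD, PySem.Dict.get?_mk_cons]
    rcases List.mem_cons.mp hp with he | ht
    · subst he; simp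
    · have : a ≠ p.1 := fun h => hnot (h ▸ List.mem_map_of_mem ht)
      have hb : (a == p.1) = false := by simp [this]
      rw [hb]
      simp only [Bool.false_eq_true, if_false]
      rw [← PySem.Dict.getD_eq_get?_getD]
      exact ih hndt ht

-- the two pre-sort lists coincide
theorem pv_final (v1 v2 v3 : List (String × Int))
    (h1 : (v1.map Prod.fst).Nodup) (X : PySem.Dict String Int)
    (hX : X.items = (v1.filter (fun p => (((PySem.Dict.mk v2).get? p.1).isSome && ((PySem.Dict.mk v3).get? p.1).isSome))).map
          (fun p => (p.1, p.2 + (PySem.Dict.mk v2).getD p.1 0 + (PySem.Dict.mk v3).getD p.1 0))) :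
    X.keys.map (fun p => (X.getD p 0, p))
      = (PySem.Set.inter (PySem.Set.inter (PySem.Set.ofList (v1.map Prod.fst)) (v2.map Prod.fst)) (v3.map Prod.fst)).map
          (fun k => ((PySem.Dict.mk v1).getD k 0 + (PySem.Dict.mk v2).getD k 0 + (PySem.Dict.mk v3).getD k 0, k)) := by
  have hP : (fun p : String × Int => (((PySem.Dict.mk v2).get? p.1).isSome && ((PySem.Dict.mk v3).get? p.1).isSome))
      = fun p : String × Int => ((v2.map Prod.fst).contains p.1 && (v3.map Prod.fst).contains p.1) := by
    funext p; rw [pv_isSome_eq, pv_isSome_eq]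
  rw [hP] at hX
  have hcommon : PySem.Set.inter (PySem.Set.inter (PySem.Set.ofList (v1.map Prod.fst)) (v2.map Prod.fst)) (v3.map Prod.fst)
      = (v1.filter (fun p => ((v2.map Prod.fst).contains p.1 && (v3.map Prod.fst).contains p.1))).map Prod.fst := by
    rw [PySem.Set.ofList_eq_self_of_nodup _ h1]
    simp only [PySem.Set.inter, PySem.Set.contains]
    rw [List.filter_filter, List.filter_map]
    exact congrArg (List.map Prod.fst) (List.filter_congr (fun p _ => Bool.and_comm _ _))
  have hkeys : X.keys = (v1.filter (fun p => ((v2.map Prod.fst).contains p.1 && (v3.map Prod.fst).contains p.1))).map Prod.fst := by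
    simp only [PySem.Dict.keys, hX, List.map_map]
    rfl
  have hnd : X.keys.Nodup := by
    rw [hkeys]
    have hmf : (v1.filter (fun p : String × Int => ((v2.map Prod.fst).contains p.1 && (v3.map Prod.fst).contains p.1))).map Prod.fst
        = (v1.map Prod.fst).filter (fun k => ((v2.map Prod.fst).contains k && (v3.map Prod.fst).contains k)) := by
      rw [List.filter_map]
      rfl
    rw [hmf]
    exact h1.filter _
  have hswap := PySem.Dict.items_eq_map_keys X hnd 0
  calc X.keys.map (fun p => (X.getD p 0, p))
      = (X.keys.map (fun k => (k, X.getD k 0))).map (fun kv => (kv.2, kv.1)) := by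
        rw [List.map_map]
        rfl
    _ = X.items.map (fun kv => (kv.2, kv.1)) := by rw [← hswap]
    _ = ((v1.filter (fun p => ((v2.map Prod.fst).contains p.1 && (v3.map Prod.fst).contains p.1))).map
          (fun p => (p.1, p.2 + (PySem.Dict.mk v2).getD p.1 0 + (PySem.Dict.mk v3).getD p.1 0))).map (fun kv => (kv.2, kv.1)) := by
        rw [hX]
    _ = (v1.filter (fun p => ((v2.map Prod.fst).contains p.1 && (v3.map Prod.fst).contains p.1))).map
          (fun p => (p.2 + (PySem.Dict.mk v2).getD p.1 0 + (PySem.Dict.mk v3).getD p.1 0, p.1)) := by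
        rw [List.map_map]
        rfl
    _ = (v1.filter (fun p => ((v2.map Prod.fst).contains p.1 && (v3.map Prod.fst).contains p.1))).map
          (fun p => ((PySem.Dict.mk v1).getD p.1 0 + (PySem.Dict.mk v2).getD p.1 0 + (PySem.Dict.mk v3).getD p.1 0, p.1)) :=
        List.map_congr_left (fun p hp => by
          rw [pv_getD_mem v1 p h1 (List.mem_of_mem_filter hp)])
    _ = _ := by
        rw [hcommon, List.map_map]
        rfl

-- ===== VERDICT (by name: the statement is the Claim_ definition above) =====
theorem ranking_dict_spec : Claim_equal_ranking_dict := by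
  intro v1 v2 v3 _hdom hpre
  obtain ⟨h1, h2, h3⟩ := hpre
  have hitems : (v1.foldl (fun nd ij =>
      v2.foldl (fun nd xy =>
        v3.foldl (fun nd ab =>
          if ij.1 == xy.1 && xy.1 == ab.1 then nd.insert ij.1 (ij.2 + xy.2 + ab.2) else nd)
          nd) nd) (PySem.Dict.empty : PySem.Dict String Int)).items
      = (v1.filter (fun p => (((PySem.Dict.mk v2).get? p.1).isSome && ((PySem.Dict.mk v3).get? p.1).isSome))).map
          (fun p => (p.1, p.2 + (PySem.Dict.mk v2).getD p.1 0 + (PySem.Dict.mk v3).getD p.1 0)) := by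
    rw [pv_outer v2 v3 h2 h3 v1 PySem.Dict.empty h1 (fun p _ => PySem.Dict.contains_empty p.1)]
    rfl
  have hfin := pv_final v1 v2 v3 h1 _ hitems
  unfold Spec_ranking_dict
  simp only [ranking_dict, ranking_dict_alt]
  rw [hfin]
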